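-- pv_equiv track=rewrite | github.com/himitery/Algorithm | programmers/PCCP_기출문제/python/석유_시추/main.py | find_graph
-- ===== SOURCE A (Python) =====
-- from collections import deque
-- from typing import List, Tuple
--
-- def find_graph(n: int, m: int, land: List[List[int]]) -> List[List[Tuple[int, int]]]:
--     graph, visited, count = [[(0, 0) for _ in range(m)] for _ in range(n)], set(), 0
--
--     for y in range(n):
--         for x in range(m):
--             if land[y][x] == 1 and (x, y) not in visited:
--                 stack, cached, count = deque([(x, y)]), set(), count + 1
--
--                 while stack:
--                     c, r = stack.pop()
--                     visited.add((c, r))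
--                     cached.add((c, r))
--
--                     for dx, dy in [(0, -1), (0, 1), (-1, 0), (1, 0)]:
--                         nx, ny = c + dx, r + dy
--                         if (0 <= nx < m) and (0 <= ny < n) and land[ny][nx] == 1 and (nx, ny) not in visited:
--                             stack.append((nx, ny))
--
--                 group_id, amount = count, len(cached)
--                 for c, r in cached:
--                     graph[r][c] = (group_id, amount)
--
--     return graph
-- ===== SOURCE B (Python) =====
-- from typing import List, Tuple
--
-- def find_graph(n: int, m: int, land: List[List[int]]) -> List[List[Tuple[int, int]]]:
--     comp_id = {}
--     sizes = {}
--     next_id = 0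
--     for y in range(n):
--         for x in range(m):
--             if land[y][x] == 1 and (x, y) not in comp_id:
--                 next_id += 1
--                 comp = {(x, y)}
--                 frontier = [(x, y)]
--                 while frontier:
--                     new = []
--                     for cx, cy in frontier:
--                         for qx, qy in ((cx, cy - 1), (cx, cy + 1), (cx - 1, cy), (cx + 1, cy)):
--                             if 0 <= qx < m and 0 <= qy < n and land[qy][qx] == 1 and (qx, qy) not in comp:
--                                 comp.add((qx, qy))
--                                 new.append((qx, qy))
--                     frontier = new
--                 size = len(comp)
--                 for p in comp:
--                     comp_id[p] = next_id
--                 sizes[next_id] = size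
--     return [[(comp_id[(x, y)], sizes[comp_id[(x, y)]]) if (x, y) in comp_id else (0, 0)
--              for x in range(m)] for y in range(n)]
-- ===== Notes on version B (the rewrite author's own statement) =====
-- stated objective: alternative
-- what changed: A flood-fills each component with a DFS stack (deque pop/append with a global visited set) and mutates the prebuilt grid in place; B instead grows each component by level-synchronous frontier-set BFS, records labels and sizes in two dictionaries, and materialises the output grid in one final comprehension.
import Mathlib
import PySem

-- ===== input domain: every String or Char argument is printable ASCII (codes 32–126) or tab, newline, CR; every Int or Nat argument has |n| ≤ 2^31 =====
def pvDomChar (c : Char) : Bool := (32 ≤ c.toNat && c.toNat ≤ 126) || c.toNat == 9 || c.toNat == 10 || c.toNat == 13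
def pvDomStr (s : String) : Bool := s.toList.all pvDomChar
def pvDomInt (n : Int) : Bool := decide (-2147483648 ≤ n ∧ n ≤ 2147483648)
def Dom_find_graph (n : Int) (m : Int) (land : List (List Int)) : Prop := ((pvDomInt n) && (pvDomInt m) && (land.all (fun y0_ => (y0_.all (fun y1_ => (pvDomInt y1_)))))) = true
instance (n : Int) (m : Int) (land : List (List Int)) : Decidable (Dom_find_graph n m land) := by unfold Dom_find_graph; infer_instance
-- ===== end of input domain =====

-- B relabels A's DFS-stack flood fill as a frontier-set BFS with id/size dictionaries (objective: alternative, same cost).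

-- ===== PORT A =====
-- land[y][x] as both Pythons read it (exact when the index is in range; Pre_ excludes out-of-range reads, where Python raises IndexError)
def cellVal (land : List (List Int)) (y x : Int) : Int :=
  (PySem.List.pyGet? ((PySem.List.pyGet? land y).getD []) x).getD 0

def dfsDirs : List (Int × Int) := [(0, -1), (0, 1), (-1, 0), (1, 0)]

-- the inner 'for dx, dy in …: … stack.append((nx, ny))' of A; head of the list = right end of the deque
def dfsPush (n m : Int) (land : List (List Int)) (visited : PySem.Set (Int × Int))
    (c r : Int) (stack : List (Int × Int)) : List (Int × Int) :=
  dfsDirs.foldl (fun st d =>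
    let nx := c + d.1
    let ny := r + d.2
    if 0 ≤ nx ∧ nx < m ∧ 0 ≤ ny ∧ ny < n ∧ cellVal land ny nx = 1 ∧ (nx, ny) ∉ visited
    then (nx, ny) :: st else st) stack

-- A's 'while stack' loop; the fuel only makes the recursion total (5·n·m+1 steps are proved sufficient below)
def dfsLoop (n m : Int) (land : List (List Int)) :
    Nat → List (Int × Int) → PySem.Set (Int × Int) → PySem.Set (Int × Int) →
    PySem.Set (Int × Int) × PySem.Set (Int × Int)
  | 0, _, visited, cached => (visited, cached)
  | _ + 1, [], visited, cached => (visited, cached)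
  | fuel + 1, (c, r) :: st, visited, cached =>
      let visited' := PySem.Set.add visited (c, r)
      let cached' := PySem.Set.add cached (c, r)
      dfsLoop n m land fuel (dfsPush n m land visited' c r st) visited' cached'

-- graph[r][c] = v (indices are nonnegative and in range wherever A executes this)
def writeCell (g : List (List (Int × Int))) (p : Int × Int) (v : Int × Int) : List (List (Int × Int)) :=
  g.modify p.2.toNat (fun row => row.set p.1.toNat v)

def find_graph (n : Int) (m : Int) (land : List (List Int)) : List (List (Int × Int)) :=
  let init := (PySem.List.pyRange 0 n 1).map (fun _ => (PySem.List.pyRange 0 m 1).map (fun _ => ((0 : Int), (0 : Int))))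
  let final := (PySem.List.pyRange 0 n 1).foldl (fun s y =>
    (PySem.List.pyRange 0 m 1).foldl (fun s x =>
      if cellVal land y x = 1 ∧ (x, y) ∉ s.2.1 then
        let count' := s.2.2 + 1
        let vc := dfsLoop n m land (5 * (n.toNat * m.toNat) + 1) [(x, y)] s.2.1 PySem.Set.empty
        let amount := PySem.Set.len vc.2
        (vc.2.foldl (fun g p => writeCell g p (count', amount)) s.1, vc.1, count')
      else s) s)
    (init, (PySem.Set.empty : PySem.Set (Int × Int)), (0 : Int))
  final.1

-- ===== PORT B =====
def nbrs (p : Int × Int) : List (Int × Int) :=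
  [(p.1, p.2 - 1), (p.1, p.2 + 1), (p.1 - 1, p.2), (p.1 + 1, p.2)]

-- one BFS round: grow comp by the unseen land neighbours of the frontier, collecting them in order
def bfsExpand (n m : Int) (land : List (List Int)) (frontier : List (Int × Int))
    (comp : PySem.Set (Int × Int)) : PySem.Set (Int × Int) × List (Int × Int) :=
  frontier.foldl (fun s p =>
    (nbrs p).foldl (fun s q =>
      if 0 ≤ q.1 ∧ q.1 < m ∧ 0 ≤ q.2 ∧ q.2 < n ∧ cellVal land q.2 q.1 = 1 ∧ q ∉ s.1
      then (PySem.Set.add s.1 q, s.2 ++ [q]) else s) s) (comp, [])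

-- B's 'while frontier' loop; the fuel only makes the recursion total (n·m+2 rounds are proved sufficient below)
def bfsLoop (n m : Int) (land : List (List Int)) :
    Nat → List (Int × Int) → PySem.Set (Int × Int) → PySem.Set (Int × Int)
  | 0, _, comp => comp
  | _ + 1, [], comp => comp
  | fuel + 1, p :: fr, comp =>
      let cn := bfsExpand n m land (p :: fr) comp
      bfsLoop n m land fuel cn.2 cn.1

def find_graph_alt (n : Int) (m : Int) (land : List (List Int)) : List (List (Int × Int)) :=
  let st := (PySem.List.pyRange 0 n 1).foldl (fun s y =>
    (PySem.List.pyRange 0 m 1).foldl (fun s x =>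
      if cellVal land y x = 1 ∧ (PySem.Dict.contains s.1 (x, y)) = false then
        let id := s.2.2 + 1
        let comp := bfsLoop n m land (n.toNat * m.toNat + 2) [(x, y)] (PySem.Set.ofList [(x, y)])
        (comp.foldl (fun d p => d.insert p id) s.1, PySem.Dict.insert s.2.1 id (PySem.Set.len comp), id)
      else s) s)
    ((PySem.Dict.empty : PySem.Dict (Int × Int) Int), (PySem.Dict.empty : PySem.Dict Int Int), (0 : Int))
  (PySem.List.pyRange 0 n 1).map (fun y =>
    (PySem.List.pyRange 0 m 1).map (fun x =>
      match PySem.Dict.get? st.1 (x, y) with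
      | some i => (i, PySem.Dict.getD st.2.1 i 0)
      | none => ((0 : Int), (0 : Int))))

-- ===== PRECONDITION & SPEC =====
-- Pre_ excludes exactly the grids on which the Python A raises IndexError: fewer than n rows, or one of the first n rows shorter than m.
def Pre_find_graph (n : Int) (m : Int) (land : List (List Int)) : Prop :=
  0 < n → 0 < m → n.toNat ≤ land.length ∧ ∀ row ∈ land.take n.toNat, m.toNat ≤ row.length
instance (n : Int) (m : Int) (land : List (List Int)) : Decidable (Pre_find_graph n m land) := by unfold Pre_find_graph; infer_instance
def pvWitness_find_graph : Int × Int × List (List Int) := (2, 3, [[1, 0, 1], [1, 1, 0]])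

def Spec_find_graph (n : Int) (m : Int) (land : List (List Int)) (out : List (List (Int × Int))) : Prop := out = find_graph_alt n m land
instance (n : Int) (m : Int) (land : List (List Int)) (out : List (List (Int × Int))) : Decidable (Spec_find_graph n m land out) := by unfold Spec_find_graph; infer_instance

-- ===== CLAIM (what is proved, stated in full; the proofs are below) =====
def Claim_equal_find_graph : Prop := ∀ (n : Int) (m : Int) (land : List (List Int)), Dom_find_graph n m land → Pre_find_graph n m land → Spec_find_graph n m land (find_graph n m land)

-- ===== LEMMAS AND PROOFS =====

-- a cell that both programs treat as land, in bounds
def okb (n m : Int) (land : List (List Int)) (p : Int × Int) : Bool :=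
  decide (0 ≤ p.1 ∧ p.1 < m ∧ 0 ≤ p.2 ∧ p.2 < n ∧ cellVal land p.2 p.1 = 1)

def stepc (n m : Int) (land : List (List Int)) (p q : Int × Int) : Prop :=
  okb n m land p = true ∧ okb n m land q = true ∧ q ∈ nbrs p

def reach (n m : Int) (land : List (List Int)) : (Int × Int) → (Int × Int) → Prop :=
  Relation.ReflTransGen (stepc n m land)

-- finite universe of in-bounds land cells, for the fuel bounds
noncomputable def okF (n m : Int) (land : List (List Int)) : Finset (Int × Int) :=
  (Finset.Icc 0 (m - 1) ×ˢ Finset.Icc 0 (n - 1)).filter (fun p => okb n m land p = true)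

noncomputable def remF (n m : Int) (land : List (List Int)) (V : List (Int × Int)) : Nat :=
  ((okF n m land).filter (fun p => p ∉ V)).card

lemma mem_nbrs_symm {p q : Int × Int} (h : q ∈ nbrs p) : p ∈ nbrs q := by
  obtain ⟨a, b⟩ := p; obtain ⟨c, d⟩ := q
  simp only [nbrs, List.mem_cons, Prod.mk.injEq, List.not_mem_nil, or_false] at h ⊢
  omega

lemma stepc_symm {n m : Int} {land : List (List Int)} : Symmetric (stepc n m land) := by
  intro p q ⟨hp, hq, hn⟩; exact ⟨hq, hp, mem_nbrs_symm hn⟩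

lemma reach_symm {n m : Int} {land : List (List Int)} {p q : Int × Int}
    (h : reach n m land p q) : reach n m land q p :=
  Relation.ReflTransGen.symmetric stepc_symm h

lemma reach_ok {n m : Int} {land : List (List Int)} {p q : Int × Int}
    (hs : okb n m land p = true) (h : reach n m land p q) : okb n m land q = true := by
  induction h with
  | refl => exact hs
  | tail _ h2 _ => exact h2.2.1

lemma okb_mem_okF {n m : Int} {land : List (List Int)} {p : Int × Int}
    (h : okb n m land p = true) : p ∈ okF n m land := by
  have h' := h
  simp only [okb, decide_eq_true_eq] at h'
  simp only [okF, Finset.mem_filter, Finset.mem_product, Finset.mem_Icc]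
  exact ⟨⟨⟨h'.1, by omega⟩, ⟨h'.2.2.1, by omega⟩⟩, h⟩

lemma card_okF_le (n m : Int) (land : List (List Int)) :
    (okF n m land).card ≤ n.toNat * m.toNat := by
  calc (okF n m land).card ≤ (Finset.Icc (0:Int) (m - 1) ×ˢ Finset.Icc (0:Int) (n - 1)).card :=
        Finset.card_filter_le _ _
    _ = m.toNat * n.toNat := by
        rw [Finset.card_product, Int.card_Icc, Int.card_Icc]
        norm_num
    _ ≤ n.toNat * m.toNat := Nat.le_of_eq (Nat.mul_comm _ _)

lemma remF_le (n m : Int) (land : List (List Int)) (V : List (Int × Int)) :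
    remF n m land V ≤ n.toNat * m.toNat :=
  le_trans (Finset.card_filter_le _ _) (card_okF_le n m land)

-- remF drops by one when an ok cell is first visited
lemma remF_add_not_mem {n m : Int} {land : List (List Int)} {V : List (Int × Int)} {p : Int × Int}
    (hok : okb n m land p = true) (hnv : p ∉ V) :
    remF n m land (V ++ [p]) + 1 = remF n m land V := by
  have hmemF : p ∈ (okF n m land).filter (fun q => q ∉ V) := by
    simp only [Finset.mem_filter]
    exact ⟨okb_mem_okF hok, hnv⟩
  have hset : (okF n m land).filter (fun q => q ∉ V)
      = insert p ((okF n m land).filter (fun q => q ∉ V ++ [p])) := by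
    ext q
    simp only [Finset.mem_filter, Finset.mem_insert, List.mem_append, List.mem_singleton]
    constructor
    · intro ⟨hq1, hq2⟩
      by_cases hqp : q = p
      · exact Or.inl hqp
      · exact Or.inr ⟨hq1, fun h => h.elim hq2 hqp⟩
    · rintro (rfl | ⟨hq1, hq2⟩)
      · exact ⟨okb_mem_okF hok, hnv⟩
      · exact ⟨hq1, fun h => hq2 (Or.inl h)⟩
  have hnot : p ∉ (okF n m land).filter (fun q => q ∉ V ++ [p]) := by
    simp
  have := Finset.card_insert_of_notMem hnot
  simp only [remF]
  rw [hset, this]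

-- generic: a fold that conses the elements passing a test, in order
lemma foldl_cons_if {α : Type} (p : α → Prop) [DecidablePred p] :
    ∀ (l : List α) (st : List α),
      l.foldl (fun st q => if p q then q :: st else st) st = (l.filter (fun q => decide (p q))).reverse ++ st := by
  intro l
  induction l with
  | nil => intro st; simp
  | cons a l ih =>
      intro st
      by_cases h : p a <;> simp [h, ih]

def pushable (n m : Int) (land : List (List Int)) (V : PySem.Set (Int × Int)) (q : Int × Int) : Bool :=
  decide (0 ≤ q.1 ∧ q.1 < m ∧ 0 ≤ q.2 ∧ q.2 < n ∧ cellVal land q.2 q.1 = 1 ∧ q ∉ V)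

lemma pushable_iff {n m : Int} {land : List (List Int)} {V : PySem.Set (Int × Int)} {q : Int × Int} :
    pushable n m land V q = true ↔ okb n m land q = true ∧ q ∉ V := by
  simp only [pushable, okb, decide_eq_true_eq]; tauto

lemma dfsPush_eq (n m : Int) (land : List (List Int)) (V : PySem.Set (Int × Int))
    (c r : Int) (st : List (Int × Int)) :
    dfsPush n m land V c r st
      = ((nbrs (c, r)).filter (pushable n m land V)).reverse ++ st := by
  have h1 : dfsPush n m land V c r st
      = (dfsDirs.map (fun d => (c + d.1, r + d.2))).foldl
          (fun st q => if pushable n m land V q = true then q :: st else st) st := by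
    rw [List.foldl_map]
    simp only [dfsPush, pushable, decide_eq_true_eq]
  rw [h1, show dfsDirs.map (fun d => ((c + d.1, r + d.2) : Int × Int)) = nbrs (c, r) from by
    norm_num [dfsDirs, nbrs]; omega]
  have h2 := foldl_cons_if (fun q => pushable n m land V q = true) (nbrs (c, r)) st
  simpa using h2

-- ===== A's inner loop: the cached set is exactly the connected component of the start =====

-- the stack-discipline invariant: below any already-visited entry of the stack, nothing new will ever be pushed
def StackInv (n m : Int) (land : List (List Int)) (st : List (Int × Int)) (V : PySem.Set (Int × Int)) : Prop :=
  ∀ pre p suf, st = pre ++ p :: suf → p ∈ V →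
    ∀ q, stepc n m land p q → q ∈ V ∨ q ∈ pre

lemma dfs_main (n m : Int) (land : List (List Int)) (s : Int × Int) (Vprev : List (Int × Int)) :
    ∀ (f : Nat) (st : List (Int × Int)) (V C : PySem.Set (Int × Int)),
      (∀ p ∈ st, okb n m land p = true ∧ reach n m land s p) →
      StackInv n m land st V →
      (∀ p, p ∈ V ↔ p ∈ Vprev ∨ p ∈ C) →
      (∀ p ∈ C, reach n m land s p) →
      (∀ p ∈ C, ∀ q, stepc n m land p q → q ∈ V ∨ q ∈ st) →
      (s ∈ C ∨ s ∈ st) →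
      C.Nodup → V.Nodup →
      5 * remF n m land V + st.length ≤ f →
      (∀ p, p ∈ (dfsLoop n m land f st V C).1 ↔ p ∈ Vprev ∨ p ∈ (dfsLoop n m land f st V C).2) ∧
      (∀ p ∈ (dfsLoop n m land f st V C).2, reach n m land s p) ∧
      (∀ p ∈ (dfsLoop n m land f st V C).2, ∀ q, stepc n m land p q → q ∈ (dfsLoop n m land f st V C).1) ∧
      s ∈ (dfsLoop n m land f st V C).2 ∧
      (dfsLoop n m land f st V C).2.Nodup ∧ (dfsLoop n m land f st V C).1.Nodup := by
  intro f
  induction f with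
  | zero =>
      intro st V C h1 h2 h3 h4 h5 h6 ndC ndV hf
      have hst : st = [] := by
        cases st with
        | nil => rfl
        | cons a l => simp [List.length_cons] at hf
      subst hst
      simp only [dfsLoop]
      refine ⟨h3, h4, ?_, ?_, ndC, ndV⟩
      · intro p hp q hq
        rcases h5 p hp q hq with h | h
        · exact h
        · simp at h
      · rcases h6 with h | h
        · exact h
        · simp at h
  | succ f ih =>
      intro st V C h1 h2 h3 h4 h5 h6 ndC ndV hf
      cases st with
      | nil =>
          simp only [dfsLoop]
          refine ⟨h3, h4, ?_, ?_, ndC, ndV⟩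
          · intro p hp q hq
            rcases h5 p hp q hq with h | h
            · exact h
            · simp at h
          · rcases h6 with h | h
            · exact h
            · simp at h
      | cons pr rest =>
          obtain ⟨c, r⟩ := pr
          simp only [dfsLoop]
          have hp := h1 (c, r) List.mem_cons_self
          have hokp : okb n m land (c, r) = true := hp.1
          have hreachp : reach n m land s (c, r) := hp.2
          simp only [List.length_cons] at hf
          apply ih
          -- h1': stack elements are ok and reachable
          · rw [dfsPush_eq]
            intro q hq
            rcases List.mem_append.mp hq with hq1 | hq2
            · rw [List.mem_reverse, List.mem_filter] at hq1
              obtain ⟨hqn, hqp⟩ := hq1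
              rw [pushable_iff] at hqp
              exact ⟨hqp.1, Relation.ReflTransGen.tail hreachp ⟨hokp, hqp.1, hqn⟩⟩
            · exact h1 q (List.mem_cons_of_mem _ hq2)
          -- h2': the stack discipline survives the pop and the pushes
          · intro pre p suf hdec hpV' q hq
            rw [dfsPush_eq] at hdec
            rcases List.append_eq_append_iff.mp hdec with ⟨as, hpre, hrest⟩ | ⟨bs, hpushL, hx⟩
            · rcases (PySem.Set.mem_add _ _ _).mp hpV' with hpV | rfl
              · have hold := h2 ((c, r) :: as) p suf (by simp [hrest]) hpV q hq
                rcases hold with hv | hm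
                · exact Or.inl ((PySem.Set.mem_add _ _ _).mpr (Or.inl hv))
                · rcases List.mem_cons.mp hm with rfl | has
                  · exact Or.inl ((PySem.Set.mem_add _ _ _).mpr (Or.inr rfl))
                  · exact Or.inr (by rw [hpre]; exact List.mem_append_right _ has)
              · by_cases hqV : q ∈ PySem.Set.add V (c, r)
                · exact Or.inl hqV
                · refine Or.inr ?_
                  rw [hpre]
                  apply List.mem_append_left
                  rw [List.mem_reverse, List.mem_filter]
                  exact ⟨hq.2.2, pushable_iff.mpr ⟨hq.2.1, hqV⟩⟩
            · cases bs with
              | nil =>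
                  simp only [List.nil_append] at hx
                  rcases (PySem.Set.mem_add _ _ _).mp hpV' with hpV | rfl
                  · have hold := h2 [(c, r)] p suf (by simp [← hx]) hpV q hq
                    rcases hold with hv | hm
                    · exact Or.inl ((PySem.Set.mem_add _ _ _).mpr (Or.inl hv))
                    · rcases List.mem_cons.mp hm with rfl | him
                      · exact Or.inl ((PySem.Set.mem_add _ _ _).mpr (Or.inr rfl))
                      · simp at him
                  · by_cases hqV : q ∈ PySem.Set.add V (c, r)
                    · exact Or.inl hqV
                    · refine Or.inr ?_
                      have : q ∈ ((nbrs (c, r)).filter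
                          (pushable n m land (PySem.Set.add V (c, r)))).reverse := by
                        rw [List.mem_reverse, List.mem_filter]
                        exact ⟨hq.2.2, pushable_iff.mpr ⟨hq.2.1, hqV⟩⟩
                      rw [hpushL] at this
                      simpa using this
              | cons b bs' =>
                  have hpb : p = b := by
                    have := congrArg (fun l => l.head?) hx
                    simpa using this
                  subst hpb
                  have hbmem : p ∈ ((nbrs (c, r)).filter
                      (pushable n m land (PySem.Set.add V (c, r)))).reverse := by
                    rw [hpushL]
                    exact List.mem_append_right _ List.mem_cons_self
                  rw [List.mem_reverse, List.mem_filter] at hbmem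
                  rw [pushable_iff] at hbmem
                  exact absurd hpV' hbmem.2.2
          -- h3': visited = previously visited ∪ cached
          · intro p
            rw [PySem.Set.mem_add, PySem.Set.mem_add, h3 p]
            tauto
          -- h4': cached cells are reachable
          · intro p hpC'
            rcases (PySem.Set.mem_add _ _ _).mp hpC' with hpC | rfl
            · exact h4 p hpC
            · exact hreachp
          -- h5': neighbours of cached cells are visited or on the stack
          · rw [dfsPush_eq]
            intro p hpC' q hq
            rcases (PySem.Set.mem_add _ _ _).mp hpC' with hpC | rfl
            · rcases h5 p hpC q hq with hv | hm
              · exact Or.inl ((PySem.Set.mem_add _ _ _).mpr (Or.inl hv))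
              · rcases List.mem_cons.mp hm with rfl | hr
                · exact Or.inl ((PySem.Set.mem_add _ _ _).mpr (Or.inr rfl))
                · exact Or.inr (List.mem_append_right _ hr)
            · by_cases hqV : q ∈ PySem.Set.add V (c, r)
              · exact Or.inl hqV
              · refine Or.inr (List.mem_append_left _ ?_)
                rw [List.mem_reverse, List.mem_filter]
                exact ⟨hq.2.2, pushable_iff.mpr ⟨hq.2.1, hqV⟩⟩
          -- h6': the start is cached or on the stack
          · rcases h6 with hs6 | hs6
            · exact Or.inl ((PySem.Set.mem_add _ _ _).mpr (Or.inl hs6))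
            · rcases List.mem_cons.mp hs6 with rfl | hr
              · exact Or.inl ((PySem.Set.mem_add _ _ _).mpr (Or.inr rfl))
              · exact Or.inr (by rw [dfsPush_eq]; exact List.mem_append_right _ hr)
          · exact PySem.Set.nodup_add _ _ ndC
          · exact PySem.Set.nodup_add _ _ ndV
          -- fuel
          · rw [dfsPush_eq, List.length_append, List.length_reverse]
            have hlf : ((nbrs (c, r)).filter
                (pushable n m land (PySem.Set.add V (c, r)))).length ≤ 4 :=
              le_trans (List.length_filter_le _ _) (by simp [nbrs])
            by_cases hv : (c, r) ∈ V
            · have hVeq : PySem.Set.add V (c, r) = V := PySem.Set.add_of_mem hv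
              have hpush : (nbrs (c, r)).filter
                  (pushable n m land (PySem.Set.add V (c, r))) = [] := by
                rw [List.filter_eq_nil_iff]
                intro q hqn hqp
                rw [pushable_iff, hVeq] at hqp
                rcases h2 [] (c, r) rest rfl hv q ⟨hokp, hqp.1, hqn⟩ with hqV | hqe
                · exact hqp.2 hqV
                · simp at hqe
              rw [hpush, hVeq]
              simp only [List.length_nil]
              omega
            · have hVeq : PySem.Set.add V (c, r) = V ++ [(c, r)] := PySem.Set.add_of_not_mem hv
              have hrem : remF n m land (V ++ [(c, r)]) + 1 = remF n m land V :=
                remF_add_not_mem hokp hv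
              rw [hVeq] at hlf ⊢
              omega

-- ===== B's inner loop: comp is exactly the connected component of the start =====

lemma remF_append {n m : Int} {land : List (List Int)} :
    ∀ (delta : List (Int × Int)) (comp : List (Int × Int)),
      (∀ r ∈ delta, okb n m land r = true ∧ r ∉ comp) → delta.Nodup →
      remF n m land (comp ++ delta) + delta.length = remF n m land comp := by
  intro delta
  induction delta with
  | nil => intro comp _ _; simp
  | cons r ds ih =>
      intro comp hd nd
      have h1 : remF n m land ((comp ++ [r]) ++ ds) + ds.length = remF n m land (comp ++ [r]) := by
        apply ih
        · intro r' hr'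
          refine ⟨(hd r' (List.mem_cons_of_mem _ hr')).1, ?_⟩
          simp only [List.mem_append, List.mem_singleton]
          rintro (hc | rfl)
          · exact (hd r' (List.mem_cons_of_mem _ hr')).2 hc
          · exact (List.nodup_cons.mp nd).1 hr'
        · exact (List.nodup_cons.mp nd).2
      have h2 : remF n m land (comp ++ [r]) + 1 = remF n m land comp :=
        remF_add_not_mem (hd r List.mem_cons_self).1 (hd r List.mem_cons_self).2
      have h3 : comp ++ r :: ds = (comp ++ [r]) ++ ds := by simp
      rw [h3, List.length_cons]
      omega

lemma bfsInner_eq (n m : Int) (land : List (List Int)) :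
    ∀ (qs : List (Int × Int)) (s : PySem.Set (Int × Int) × List (Int × Int)),
      ∃ delta,
        (qs.foldl (fun s q =>
          if 0 ≤ q.1 ∧ q.1 < m ∧ 0 ≤ q.2 ∧ q.2 < n ∧ cellVal land q.2 q.1 = 1 ∧ q ∉ s.1
          then (PySem.Set.add s.1 q, s.2 ++ [q]) else s) s).1 = s.1 ++ delta ∧
        (qs.foldl (fun s q =>
          if 0 ≤ q.1 ∧ q.1 < m ∧ 0 ≤ q.2 ∧ q.2 < n ∧ cellVal land q.2 q.1 = 1 ∧ q ∉ s.1
          then (PySem.Set.add s.1 q, s.2 ++ [q]) else s) s).2 = s.2 ++ delta ∧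
        delta.Nodup ∧
        (∀ r ∈ delta, okb n m land r = true ∧ r ∉ s.1 ∧ r ∈ qs) ∧
        (∀ r ∈ qs, okb n m land r = true → r ∈ s.1 ++ delta) := by
  intro qs
  induction qs with
  | nil =>
      intro s
      exact ⟨[], by simp, by simp, List.nodup_nil, by simp, by simp⟩
  | cons q qs ih =>
      intro s
      simp only [List.foldl_cons]
      by_cases hq : 0 ≤ q.1 ∧ q.1 < m ∧ 0 ≤ q.2 ∧ q.2 < n ∧ cellVal land q.2 q.1 = 1 ∧ q ∉ s.1
      · rw [if_pos hq]
        have hnv : q ∉ s.1 := hq.2.2.2.2.2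
        have hok : okb n m land q = true := by
          simp only [okb, decide_eq_true_eq]; tauto
        obtain ⟨delta, e1, e2, nd, hmem, hcov⟩ := ih (PySem.Set.add s.1 q, s.2 ++ [q])
        simp only [PySem.Set.add_of_not_mem hnv] at hmem hcov
        refine ⟨q :: delta, ?_, ?_, ?_, ?_, ?_⟩
        · rw [e1]; simp [PySem.Set.add_of_not_mem hnv]
        · rw [e2]; simp
        · rw [List.nodup_cons]
          refine ⟨fun hqd => ?_, nd⟩
          have := (hmem q hqd).2.1
          simp at this
        · intro r hr
          rcases List.mem_cons.mp hr with rfl | hr'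
          · exact ⟨hok, hnv, List.mem_cons_self⟩
          · obtain ⟨a1, a2, a3⟩ := hmem r hr'
            refine ⟨a1, fun hc => a2 ?_, List.mem_cons_of_mem _ a3⟩
            simp [hc]
        · intro r hr hokr
          rcases List.mem_cons.mp hr with rfl | hr'
          · simp
          · have := hcov r hr' hokr
            simp only [List.mem_append, List.mem_cons] at this ⊢
            tauto
      · rw [if_neg hq]
        obtain ⟨delta, e1, e2, nd, hmem, hcov⟩ := ih s
        refine ⟨delta, e1, e2, nd, ?_, ?_⟩
        · intro r hr
          obtain ⟨a1, a2, a3⟩ := hmem r hr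
          exact ⟨a1, a2, List.mem_cons_of_mem _ a3⟩
        · intro r hr hokr
          rcases List.mem_cons.mp hr with rfl | hr'
          · have hin : r ∈ s.1 := by
              simp only [okb, decide_eq_true_eq] at hokr
              by_contra hc
              exact hq ⟨hokr.1, hokr.2.1, hokr.2.2.1, hokr.2.2.2.1, hokr.2.2.2.2, hc⟩
            exact List.mem_append_left _ hin
          · exact hcov r hr' hokr

lemma bfsExpand_eq (n m : Int) (land : List (List Int)) (frontier : List (Int × Int))
    (comp : PySem.Set (Int × Int)) :
    ∃ delta,
      (bfsExpand n m land frontier comp).1 = comp ++ delta ∧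
      (bfsExpand n m land frontier comp).2 = delta ∧
      delta.Nodup ∧
      (∀ q ∈ delta, okb n m land q = true ∧ q ∉ comp ∧ ∃ p ∈ frontier, q ∈ nbrs p) ∧
      (∀ p ∈ frontier, ∀ q, okb n m land q = true → q ∈ nbrs p → q ∈ comp ++ delta) := by
  suffices h : ∀ (fr : List (Int × Int)) (s : PySem.Set (Int × Int) × List (Int × Int)),
      ∃ delta,
        (fr.foldl (fun s p =>
          (nbrs p).foldl (fun s q =>
            if 0 ≤ q.1 ∧ q.1 < m ∧ 0 ≤ q.2 ∧ q.2 < n ∧ cellVal land q.2 q.1 = 1 ∧ q ∉ s.1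
            then (PySem.Set.add s.1 q, s.2 ++ [q]) else s) s) s).1 = s.1 ++ delta ∧
        (fr.foldl (fun s p =>
          (nbrs p).foldl (fun s q =>
            if 0 ≤ q.1 ∧ q.1 < m ∧ 0 ≤ q.2 ∧ q.2 < n ∧ cellVal land q.2 q.1 = 1 ∧ q ∉ s.1
            then (PySem.Set.add s.1 q, s.2 ++ [q]) else s) s) s).2 = s.2 ++ delta ∧
        delta.Nodup ∧
        (∀ r ∈ delta, okb n m land r = true ∧ r ∉ s.1 ∧ ∃ p ∈ fr, r ∈ nbrs p) ∧
        (∀ p ∈ fr, ∀ r, okb n m land r = true → r ∈ nbrs p → r ∈ s.1 ++ delta) by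
    obtain ⟨delta, e1, e2, nd, hmem, hcov⟩ := h frontier (comp, [])
    exact ⟨delta, e1, by simpa using e2, nd, hmem, hcov⟩
  intro fr
  induction fr with
  | nil =>
      intro s
      exact ⟨[], by simp, by simp, List.nodup_nil, by simp, by simp⟩
  | cons p fr ih =>
      intro s
      simp only [List.foldl_cons]
      obtain ⟨d1, e1, e2, nd1, hmem1, hcov1⟩ := bfsInner_eq n m land (nbrs p) s
      obtain ⟨d2, f1, f2, nd2, hmem2, hcov2⟩ :=
        ih ((nbrs p).foldl (fun s q =>
          if 0 ≤ q.1 ∧ q.1 < m ∧ 0 ≤ q.2 ∧ q.2 < n ∧ cellVal land q.2 q.1 = 1 ∧ q ∉ s.1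
          then (PySem.Set.add s.1 q, s.2 ++ [q]) else s) s)
      refine ⟨d1 ++ d2, ?_, ?_, ?_, ?_, ?_⟩
      · rw [f1, e1, List.append_assoc]
      · rw [f2, e2, List.append_assoc]
      · refine List.Nodup.append nd1 nd2 ?_
        intro r hr1 hr2
        have := (hmem2 r hr2).2.1
        rw [e1] at this
        exact this (List.mem_append_right _ hr1)
      · intro r hr
        rcases List.mem_append.mp hr with hr1 | hr2
        · obtain ⟨a1, a2, a3⟩ := hmem1 r hr1
          exact ⟨a1, a2, p, List.mem_cons_self, a3⟩
        · obtain ⟨a1, a2, ⟨p', hp', hn'⟩⟩ := hmem2 r hr2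
          rw [e1] at a2
          exact ⟨a1, fun hc => a2 (List.mem_append_left _ hc),
            p', List.mem_cons_of_mem _ hp', hn'⟩
      · intro p' hp' r hokr hnr
        rcases List.mem_cons.mp hp' with rfl | hp''
        · have := hcov1 r hnr hokr
          simp only [List.mem_append] at this ⊢
          tauto
        · have := hcov2 p' hp'' r hokr hnr
          rw [e1] at this
          simp only [List.mem_append] at this ⊢
          tauto

lemma bfs_main (n m : Int) (land : List (List Int)) (s : Int × Int) (hs : okb n m land s = true) :
    ∀ (f : Nat) (frontier : List (Int × Int)) (comp : PySem.Set (Int × Int)),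
      (∀ p ∈ frontier, p ∈ comp) →
      (∀ p ∈ comp, reach n m land s p) →
      (∀ p ∈ comp, p ∉ frontier → ∀ q, stepc n m land p q → q ∈ comp) →
      s ∈ comp → comp.Nodup →
      remF n m land comp + 2 ≤ f →
      (∀ p ∈ bfsLoop n m land f frontier comp, reach n m land s p) ∧
      (∀ p ∈ bfsLoop n m land f frontier comp, ∀ q, stepc n m land p q → q ∈ bfsLoop n m land f frontier comp) ∧
      s ∈ bfsLoop n m land f frontier comp ∧ (bfsLoop n m land f frontier comp).Nodup := by
  intro f
  induction f with
  | zero =>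
      intro frontier comp h1 h2 h3 h4 h5 hf
      exact absurd hf (by omega)
  | succ f ih =>
      intro frontier comp h1 h2 h3 h4 h5 hf
      cases frontier with
      | nil =>
          simp only [bfsLoop]
          exact ⟨h2, fun p hp q hq => h3 p hp (by simp) q hq, h4, h5⟩
      | cons p0 fr =>
          simp only [bfsLoop]
          obtain ⟨delta, e1, e2, nd, hmem, hcov⟩ := bfsExpand_eq n m land (p0 :: fr) comp
          rw [e1, e2]
          -- soundness of the grown component
          have hsound : ∀ r ∈ comp ++ delta, reach n m land s r := by
            intro r hr
            rcases List.mem_append.mp hr with hc | hd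
            · exact h2 r hc
            · obtain ⟨a1, _, p', hp', hn'⟩ := hmem r hd
              have hp'c : p' ∈ comp := h1 p' hp'
              have hokp' : okb n m land p' = true := reach_ok hs (h2 p' hp'c)
              exact Relation.ReflTransGen.tail (h2 p' hp'c) ⟨hokp', a1, hn'⟩
          have hclosed : ∀ r ∈ comp ++ delta, r ∉ delta → ∀ q, stepc n m land r q → q ∈ comp ++ delta := by
            intro r hr hrd q hq
            rcases List.mem_append.mp hr with hc | hd
            · by_cases hrf : r ∈ p0 :: fr
              · exact hcov r hrf q hq.2.1 hq.2.2
              · exact List.mem_append_left _ (h3 r hc hrf q hq)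
            · exact absurd hd hrd
          have hnd : (comp ++ delta).Nodup := by
            refine List.Nodup.append h5 nd ?_
            intro r hr1 hr2
            exact (hmem r hr2).2.1 hr1
          cases delta with
          | nil =>
              have hf1 : 1 ≤ f := by omega
              obtain ⟨f', rfl⟩ : ∃ f', f = f' + 1 := ⟨f - 1, by omega⟩
              simp only [bfsLoop]
              refine ⟨fun r hr => hsound r (by simpa using hr), ?_, by simpa using h4, by simpa using hnd⟩
              intro r hr q hq
              have := hclosed r (by simpa using hr) (by simp) q hq
              simpa using this
          | cons d0 ds =>
              apply ih
              · intro r hr; exact List.mem_append_right _ hr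
              · exact hsound
              · intro r hr hrf q hq; exact hclosed r hr hrf q hq
              · exact List.mem_append_left _ h4
              · exact hnd
              · have hre : remF n m land (comp ++ d0 :: ds) + (d0 :: ds).length = remF n m land comp :=
                  remF_append (d0 :: ds) comp (fun r hr => ⟨(hmem r hr).1, (hmem r hr).2.1⟩) nd
                simp only [List.length_cons] at hre
                omega

-- closed ∧ reachable-sound ∧ contains s  ⟹  membership is exactly reachability
lemma closed_eq_reach {n m : Int} {land : List (List Int)} {s : Int × Int} {S : List (Int × Int)}
    (hsound : ∀ p ∈ S, reach n m land s p)
    (hclosed : ∀ p ∈ S, ∀ q, stepc n m land p q → q ∈ S)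
    (hmem : s ∈ S) :
    ∀ q, q ∈ S ↔ reach n m land s q := by
  intro q
  constructor
  · exact hsound q
  · intro h
    induction h with
    | refl => exact hmem
    | tail h1 h2 ih => exact hclosed _ ih _ h2

-- ===== the written graph, in closed form =====

def mapform (n m : Int) (f : Int × Int → Int × Int) : List (List (Int × Int)) :=
  (PySem.List.pyRange 0 n 1).map (fun y => (PySem.List.pyRange 0 m 1).map (fun x => f (x, y)))

lemma length_mapform (n m : Int) (f : Int × Int → Int × Int) :
    (mapform n m f).length = n.toNat := by
  simp [mapform, PySem.List.length_pyRange_one]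

lemma getElem_mapform {n m : Int} (f : Int × Int → Int × Int) {i : Nat}
    (hi : i < (mapform n m f).length) :
    (mapform n m f)[i] = (PySem.List.pyRange 0 m 1).map (fun x => f (x, (i : Int))) := by
  simp [mapform, PySem.List.getElem_pyRange_one]

lemma writeCell_mapform {n m : Int} {p : Int × Int} (f : Int × Int → Int × Int) (v : Int × Int)
    (h1 : 0 ≤ p.1) (h2 : p.1 < m) (h3 : 0 ≤ p.2) (h4 : p.2 < n) :
    writeCell (mapform n m f) p v = mapform n m (fun q => if q = p then v else f q) := by
  have hp1 : (p.1.toNat : Int) = p.1 := Int.toNat_of_nonneg h1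
  have hp2 : (p.2.toNat : Int) = p.2 := Int.toNat_of_nonneg h3
  apply List.ext_getElem
  · simp [writeCell, List.length_modify, length_mapform]
  · intro i hi1 hi2
    simp only [writeCell]
    rw [List.getElem_modify]
    have hi1' : i < (mapform n m f).length := by
      simp only [writeCell, List.length_modify] at hi1
      exact hi1
    rw [getElem_mapform f hi1', getElem_mapform _ hi2]
    by_cases hy : p.2.toNat = i
    · rw [if_pos hy]
      apply List.ext_getElem
      · simp
      · intro j hj1 hj2
        rw [List.getElem_set]
        simp only [List.getElem_map, PySem.List.getElem_pyRange_one, zero_add]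
        by_cases hx : p.1.toNat = j
        · rw [if_pos hx]
          have : ((j : Int), (i : Int)) = p := by
            obtain ⟨a, b⟩ := p
            simp only [Prod.mk.injEq]
            constructor <;> omega
          rw [if_pos this]
        · rw [if_neg hx, if_neg]
          intro hcon
          apply hx
          obtain ⟨a, b⟩ := p
          simp only [Prod.mk.injEq] at hcon
          omega
    · rw [if_neg hy]
      apply List.map_congr_left
      intro x _
      rw [if_neg]
      intro hcon
      apply hy
      obtain ⟨a, b⟩ := p
      simp only [Prod.mk.injEq] at hcon
      omega

lemma mapform_congr {n m : Int} {f g : Int × Int → Int × Int}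
    (h : ∀ x y, 0 ≤ x → x < m → 0 ≤ y → y < n → f (x, y) = g (x, y)) :
    mapform n m f = mapform n m g := by
  simp only [mapform]
  apply List.map_congr_left
  intro y hy
  apply List.map_congr_left
  intro x hx
  rw [PySem.List.mem_pyRange_one] at hy hx
  exact h x y hx.1 hx.2 hy.1 hy.2

lemma foldl_writeCell {n m : Int} {land : List (List Int)} (C : List (Int × Int)) (v : Int × Int)
    (f : Int × Int → Int × Int) (hC : ∀ p ∈ C, okb n m land p = true) :
    C.foldl (fun g p => writeCell g p v) (mapform n m f)
      = mapform n m (fun q => if q ∈ C then v else f q) := by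
  induction C generalizing f with
  | nil => simp [mapform]
  | cons p C ih =>
      simp only [List.foldl_cons]
      have hp : okb n m land p = true := hC p List.mem_cons_self
      simp only [okb, decide_eq_true_eq] at hp
      rw [writeCell_mapform f v hp.1 hp.2.1 hp.2.2.1 hp.2.2.2.1]
      rw [ih _ (fun q hq => hC q (List.mem_cons_of_mem _ hq))]
      apply mapform_congr
      intro x y _ _ _ _
      by_cases h1 : (x, y) ∈ C
      · simp [h1, List.mem_cons]
      · by_cases h2 : (x, y) = p <;> simp [h1, h2, List.mem_cons]

-- ===== dictionary lemmas for B's labelling pass =====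

lemma get?_foldl_insert_const {κ : Type} [BEq κ] [LawfulBEq κ] (l : List κ) (i : Int)
    (d : PySem.Dict κ Int) (q : κ) :
    (l.foldl (fun d p => d.insert p i) d).get? q = if q ∈ l then some i else d.get? q := by
  induction l generalizing d with
  | nil => simp
  | cons k l ih =>
      simp only [List.foldl_cons]
      rw [ih]
      by_cases h1 : q ∈ l
      · simp [h1, List.mem_cons]
      · by_cases h2 : q = k
        · subst h2; simp [h1, PySem.Dict.get?_insert_self]
        · simp [h1, h2, List.mem_cons, PySem.Dict.get?_insert_of_ne _ _ h2]

-- ===== the outer scans, in lockstep =====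

lemma foldl_rel {σA σB γ : Type} (R : σA → σB → Prop) (l : List γ)
    (fA : σA → γ → σA) (fB : σB → γ → σB)
    (h : ∀ sA sB c, c ∈ l → R sA sB → R (fA sA c) (fB sB c)) :
    ∀ {a b}, R a b → R (l.foldl fA a) (l.foldl fB b) := by
  induction l with
  | nil => intro a b hr; exact hr
  | cons c l ih =>
      intro a b hr
      exact ih (fun sA sB c' hc' => h sA sB c' (List.mem_cons_of_mem _ hc')) (h a b c (List.mem_cons_self) hr)

lemma nested_foldl {σ : Type} (g : σ → Int → Int → σ) (ys xs : List Int) (init : σ) :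
    ys.foldl (fun s y => xs.foldl (fun s x => g s y x) s) init
      = (ys.flatMap (fun y => xs.map (fun x => (y, x)))).foldl (fun s yx => g s yx.1 yx.2) init := by
  induction ys generalizing init with
  | nil => rfl
  | cons y ys ih => simp [List.foldl_append, List.foldl_map, ih]

-- B's rendering of one cell of the output grid
def viewB (dId : PySem.Dict (Int × Int) Int) (dSz : PySem.Dict Int Int) (p : Int × Int) : Int × Int :=
  match PySem.Dict.get? dId p with
  | some i => (i, PySem.Dict.getD dSz i 0)
  | none => ((0 : Int), (0 : Int))

-- the coupling invariant between A's and B's outer-loop states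
def SInv (n m : Int) (land : List (List Int))
    (sA : List (List (Int × Int)) × PySem.Set (Int × Int) × Int)
    (sB : PySem.Dict (Int × Int) Int × PySem.Dict Int Int × Int) : Prop :=
  0 ≤ sA.2.2 ∧
  sA.2.2 = sB.2.2 ∧
  (∀ p, p ∈ sA.2.1 ↔ (PySem.Dict.contains sB.1 p) = true) ∧
  (∀ p ∈ sA.2.1, okb n m land p = true) ∧
  (∀ p ∈ sA.2.1, ∀ q, reach n m land p q → q ∈ sA.2.1) ∧
  sA.1 = mapform n m (viewB sB.1 sB.2.1) ∧
  (∀ p i, PySem.Dict.get? sB.1 p = some i → 1 ≤ i ∧ i ≤ sB.2.2) ∧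
  (PySem.Dict.keys sB.1).Nodup ∧ sA.2.1.Nodup

-- the two loop bodies, named (definitionally equal to the lambdas inside the ports)
def stepA (n m : Int) (land : List (List Int))
    (s : List (List (Int × Int)) × PySem.Set (Int × Int) × Int) (y x : Int) :
    List (List (Int × Int)) × PySem.Set (Int × Int) × Int :=
  if cellVal land y x = 1 ∧ (x, y) ∉ s.2.1 then
    let count' := s.2.2 + 1
    let vc := dfsLoop n m land (5 * (n.toNat * m.toNat) + 1) [(x, y)] s.2.1 PySem.Set.empty
    let amount := PySem.Set.len vc.2
    (vc.2.foldl (fun g p => writeCell g p (count', amount)) s.1, vc.1, count')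
  else s

def stepB (n m : Int) (land : List (List Int))
    (s : PySem.Dict (Int × Int) Int × PySem.Dict Int Int × Int) (y x : Int) :
    PySem.Dict (Int × Int) Int × PySem.Dict Int Int × Int :=
  if cellVal land y x = 1 ∧ (PySem.Dict.contains s.1 (x, y)) = false then
    let id := s.2.2 + 1
    let comp := bfsLoop n m land (n.toNat * m.toNat + 2) [(x, y)] (PySem.Set.ofList [(x, y)])
    (comp.foldl (fun d p => d.insert p id) s.1, PySem.Dict.insert s.2.1 id (PySem.Set.len comp), id)
  else s

lemma sinv_step (n m : Int) (land : List (List Int)) (y x : Int)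
    (hy1 : 0 ≤ y) (hy2 : y < n) (hx1 : 0 ≤ x) (hx2 : x < m)
    (sA : List (List (Int × Int)) × PySem.Set (Int × Int) × Int)
    (sB : PySem.Dict (Int × Int) Int × PySem.Dict Int Int × Int)
    (h : SInv n m land sA sB) :
    SInv n m land (stepA n m land sA y x) (stepB n m land sB y x) := by
  obtain ⟨c0, c1, c2, c3, c4, c5, c7, k1, k2⟩ := h
  by_cases hcond : cellVal land y x = 1 ∧ (x, y) ∉ sA.2.1
  case neg =>
    have hcondB : ¬ (cellVal land y x = 1 ∧ (PySem.Dict.contains sB.1 (x, y)) = false) := by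
      intro hc
      apply hcond
      refine ⟨hc.1, fun hm => ?_⟩
      have := (c2 (x, y)).mp hm
      rw [hc.2] at this
      exact Bool.false_ne_true this
    simp only [stepA, stepB]
    rw [if_neg hcond, if_neg hcondB]
    exact ⟨c0, c1, c2, c3, c4, c5, c7, k1, k2⟩
  case pos =>
    have hsnotin : (x, y) ∉ sA.2.1 := hcond.2
    have hcontf : PySem.Dict.contains sB.1 (x, y) = false := by
      cases hcf : PySem.Dict.contains sB.1 (x, y)
      · rfl
      · exact absurd ((c2 (x, y)).mpr hcf) hsnotin
    have hcondB : cellVal land y x = 1 ∧ PySem.Dict.contains sB.1 (x, y) = false :=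
      ⟨hcond.1, hcontf⟩
    simp only [stepA, stepB]
    rw [if_pos hcond, if_pos hcondB]
    have hoks : okb n m land (x, y) = true := by
      simp only [okb, decide_eq_true_eq]
      exact ⟨hx1, hx2, hy1, hy2, hcond.1⟩
    -- A's flood fill computes the component of (x, y)
    have hA := dfs_main n m land (x, y) sA.2.1 (5 * (n.toNat * m.toNat) + 1) [(x, y)] sA.2.1
      PySem.Set.empty
      (by intro p hp
          rcases List.mem_cons.mp hp with rfl | hf
          · exact ⟨hoks, Relation.ReflTransGen.refl⟩
          · simp at hf)
      (by intro pre p suf hdec hpv q hq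
          cases pre with
          | nil =>
              simp only [List.nil_append] at hdec
              obtain ⟨rfl, -⟩ := List.cons.injEq _ _ _ _ ▸ hdec
              exact absurd hpv hsnotin
          | cons a pre' =>
              have := congrArg List.length hdec
              simp at this)
      (by intro p; simp [PySem.Set.empty])
      (by intro p hp; simp [PySem.Set.empty] at hp)
      (by intro p hp; simp [PySem.Set.empty] at hp)
      (Or.inr List.mem_cons_self)
      (by simp [PySem.Set.empty])
      k2
      (by have := remF_le n m land sA.2.1
          simp only [List.length_cons, List.length_nil]
          omega)
    obtain ⟨a1, a2, a3, a4, a5, a6⟩ := hA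
    have hdisj : ∀ q, reach n m land (x, y) q → q ∉ sA.2.1 := by
      intro q hq hin
      exact hsnotin (c4 q hin (x, y) (reach_symm hq))
    have hCclosed : ∀ p ∈ (dfsLoop n m land (5 * (n.toNat * m.toNat) + 1) [(x, y)] sA.2.1
        PySem.Set.empty).2, ∀ q, stepc n m land p q →
        q ∈ (dfsLoop n m land (5 * (n.toNat * m.toNat) + 1) [(x, y)] sA.2.1 PySem.Set.empty).2 := by
      intro p hp q hq
      rcases (a1 q).mp (a3 p hp q hq) with hqprev | hqC
      · exact absurd hqprev (hdisj q (Relation.ReflTransGen.tail (a2 p hp) hq))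
      · exact hqC
    have hC := closed_eq_reach a2 hCclosed a4
    -- B's BFS computes the same component
    have hofl : PySem.Set.ofList [((x : Int), (y : Int))] = [(x, y)] :=
      PySem.Set.ofList_eq_self_of_nodup _ (by simp)
    have hB := bfs_main n m land (x, y) hoks (n.toNat * m.toNat + 2) [(x, y)]
      (PySem.Set.ofList [(x, y)])
      (by rw [hofl]; exact fun p hp => hp)
      (by rw [hofl]
          intro p hp
          rcases List.mem_cons.mp hp with rfl | hf
          · exact Relation.ReflTransGen.refl
          · simp at hf)
      (by rw [hofl]; intro p hp hpf q hq; exact absurd hp hpf)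
      (by rw [hofl]; exact List.mem_cons_self)
      (by rw [hofl]; simp)
      (by have := remF_le n m land (PySem.Set.ofList [((x : Int), (y : Int))]); omega)
    obtain ⟨b1, b2, b3, b4⟩ := hB
    have hBc := closed_eq_reach b1 b2 b3
    have hsame : ∀ q, q ∈ (dfsLoop n m land (5 * (n.toNat * m.toNat) + 1) [(x, y)] sA.2.1
        PySem.Set.empty).2 ↔ q ∈ bfsLoop n m land (n.toNat * m.toNat + 2) [(x, y)]
        (PySem.Set.ofList [(x, y)]) :=
      fun q => (hC q).trans (hBc q).symm
    have hlen : (dfsLoop n m land (5 * (n.toNat * m.toNat) + 1) [(x, y)] sA.2.1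
        PySem.Set.empty).2.length = (bfsLoop n m land (n.toNat * m.toNat + 2) [(x, y)]
        (PySem.Set.ofList [(x, y)])).length :=
      List.Perm.length_eq ((List.perm_ext_iff_of_nodup a5 b4).mpr hsame)
    have hlenI : PySem.Set.len (dfsLoop n m land (5 * (n.toNat * m.toNat) + 1) [(x, y)] sA.2.1
        PySem.Set.empty).2 = PySem.Set.len (bfsLoop n m land (n.toNat * m.toNat + 2) [(x, y)]
        (PySem.Set.ofList [(x, y)])) := by
      simp only [PySem.Set.len, hlen]
    refine ⟨?_, ?_, ?_, ?_, ?_, ?_, ?_, ?_, ?_⟩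
    · show 0 ≤ sA.2.2 + 1
      omega
    · show sA.2.2 + 1 = sB.2.2 + 1
      rw [c1]
    · intro p
      show p ∈ (dfsLoop n m land (5 * (n.toNat * m.toNat) + 1) [(x, y)] sA.2.1
          PySem.Set.empty).1 ↔ _
      by_cases hp : p ∈ bfsLoop n m land (n.toNat * m.toNat + 2) [(x, y)]
          (PySem.Set.ofList [(x, y)])
      · have e : ((bfsLoop n m land (n.toNat * m.toNat + 2) [(x, y)]
            (PySem.Set.ofList [(x, y)])).foldl (fun d q => d.insert q (sB.2.2 + 1))
            sB.1).get? p = some (sB.2.2 + 1) := by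
          rw [get?_foldl_insert_const]
          simp [hp]
        rw [PySem.Dict.contains_eq_isSome_get?, e, a1 p]
        exact ⟨fun _ => rfl, fun _ => Or.inr ((hsame p).mpr hp)⟩
      · have hpA : p ∉ (dfsLoop n m land (5 * (n.toNat * m.toNat) + 1) [(x, y)] sA.2.1
            PySem.Set.empty).2 := fun hc => hp ((hsame p).mp hc)
        have e : ((bfsLoop n m land (n.toNat * m.toNat + 2) [(x, y)]
            (PySem.Set.ofList [(x, y)])).foldl (fun d q => d.insert q (sB.2.2 + 1))
            sB.1).get? p = sB.1.get? p := by
          rw [get?_foldl_insert_const]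
          simp [hp]
        rw [PySem.Dict.contains_eq_isSome_get?, e, ← PySem.Dict.contains_eq_isSome_get?,
          ← c2 p, a1 p]
        exact ⟨fun h => h.resolve_right hpA, Or.inl⟩
    · intro p hp
      rcases (a1 p).mp hp with hprev | hC2
      · exact c3 p hprev
      · exact reach_ok hoks (a2 p hC2)
    · intro p hp q hq
      rcases (a1 p).mp hp with hprev | hC2
      · exact (a1 q).mpr (Or.inl (c4 p hprev q hq))
      · refine (a1 q).mpr (Or.inr ?_)
        rw [hC q]
        exact Relation.ReflTransGen.trans (a2 p hC2) hq
    · show (dfsLoop n m land (5 * (n.toNat * m.toNat) + 1) [(x, y)] sA.2.1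
          PySem.Set.empty).2.foldl (fun g p => writeCell g p (sA.2.2 + 1,
          PySem.Set.len (dfsLoop n m land (5 * (n.toNat * m.toNat) + 1) [(x, y)] sA.2.1
          PySem.Set.empty).2)) sA.1 = _
      rw [c5]
      rw [foldl_writeCell _ _ _ (fun p hp => reach_ok hoks (a2 p hp))]
      apply mapform_congr
      intro x' y' hx1' hx2' hy1' hy2'
      by_cases hq : (x', y') ∈ (dfsLoop n m land (5 * (n.toNat * m.toNat) + 1) [(x, y)] sA.2.1
          PySem.Set.empty).2
      · rw [if_pos hq]
        have hq' := (hsame _).mp hq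
        simp only [viewB, get?_foldl_insert_const, if_pos hq']
        rw [PySem.Dict.getD_insert_self, c1, hlenI]
      · rw [if_neg hq]
        have hq' : (x', y') ∉ bfsLoop n m land (n.toNat * m.toNat + 2) [(x, y)]
            (PySem.Set.ofList [(x, y)]) := fun hc => hq ((hsame _).mpr hc)
        simp only [viewB, get?_foldl_insert_const, if_neg hq']
        cases hg : sB.1.get? (x', y') with
        | none => rfl
        | some i =>
            have hi := (c7 _ _ hg).2
            show ((i, PySem.Dict.getD sB.2.1 i 0) : Int × Int)
              = (i, PySem.Dict.getD (PySem.Dict.insert sB.2.1 (sB.2.2 + 1)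
                  (PySem.Set.len (bfsLoop n m land (n.toNat * m.toNat + 2) [(x, y)]
                    (PySem.Set.ofList [(x, y)])))) i 0)
            rw [PySem.Dict.getD_insert_of_ne _ _ _ (by omega)]
    · intro p i hg
      show 1 ≤ i ∧ i ≤ sB.2.2 + 1
      replace hg : ((bfsLoop n m land (n.toNat * m.toNat + 2) [(x, y)]
          (PySem.Set.ofList [(x, y)])).foldl (fun d q => d.insert q (sB.2.2 + 1))
          sB.1).get? p = some i := hg
      rw [get?_foldl_insert_const] at hg
      split_ifs at hg with hp
      · obtain rfl : sB.2.2 + 1 = i := by injection hg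
        omega
      · have := c7 p i hg
        omega
    · exact PySem.Dict.nodup_keys_foldl_insert _ (fun _ _ => sB.2.2 + 1) _ k1
    · exact a6

lemma sinv_init (n m : Int) (land : List (List Int)) :
    SInv n m land
      ((PySem.List.pyRange 0 n 1).map (fun _ =>
        (PySem.List.pyRange 0 m 1).map (fun _ => ((0 : Int), (0 : Int)))),
       (PySem.Set.empty : PySem.Set (Int × Int)), (0 : Int))
      ((PySem.Dict.empty : PySem.Dict (Int × Int) Int),
       (PySem.Dict.empty : PySem.Dict Int Int), (0 : Int)) := by
  refine ⟨le_refl 0, rfl, ?_, ?_, ?_, ?_, ?_, ?_, ?_⟩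
  · intro p
    simp [PySem.Set.empty, PySem.Dict.contains_empty]
  · intro p hp
    simp [PySem.Set.empty] at hp
  · intro p hp
    simp [PySem.Set.empty] at hp
  · show _ = mapform n m (viewB PySem.Dict.empty PySem.Dict.empty)
    simp only [mapform]
    apply List.map_congr_left
    intro y _
    apply List.map_congr_left
    intro x _
    simp [viewB, PySem.Dict.get?_empty]
  · intro p i hg
    rw [PySem.Dict.get?_empty] at hg
    cases hg
  · exact PySem.Dict.nodup_keys_empty
  · simp [PySem.Set.empty]

lemma key_sinv (n m : Int) (land : List (List Int)) :
    SInv n m land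
      ((PySem.List.pyRange 0 n 1).foldl (fun s y =>
        (PySem.List.pyRange 0 m 1).foldl (fun s x => stepA n m land s y x) s)
        ((PySem.List.pyRange 0 n 1).map (fun _ =>
          (PySem.List.pyRange 0 m 1).map (fun _ => ((0 : Int), (0 : Int)))),
         (PySem.Set.empty : PySem.Set (Int × Int)), (0 : Int)))
      ((PySem.List.pyRange 0 n 1).foldl (fun s y =>
        (PySem.List.pyRange 0 m 1).foldl (fun s x => stepB n m land s y x) s)
        ((PySem.Dict.empty : PySem.Dict (Int × Int) Int),
         (PySem.Dict.empty : PySem.Dict Int Int), (0 : Int))) := by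
  rw [nested_foldl (stepA n m land), nested_foldl (stepB n m land)]
  apply foldl_rel (SInv n m land)
  · intro sA sB c hc hr
    simp only [List.mem_flatMap, List.mem_map, PySem.List.mem_pyRange_one] at hc
    obtain ⟨y, ⟨hy1, hy2⟩, x, ⟨hx1, hx2⟩, rfl⟩ := hc
    exact sinv_step n m land y x hy1 hy2 hx1 hx2 sA sB hr
  · exact sinv_init n m land

-- ===== VERDICT (by name: the statement is the Claim_ definition above) =====
theorem find_graph_spec : Claim_equal_find_graph := by
  intro n m land _ _
  show find_graph n m land = find_graph_alt n m land
  exact (key_sinv n m land).2.2.2.2.2.1
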